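-- pv_equiv track=rewrite | github.com/hincaltopcuoglu/Pythonic | work_examples.py | list_comparison_product
-- ===== SOURCE A (Python) =====
-- def list_comparison_product(numbers: list[int]) -> list[int]:
--     result = []
--
--     for i in range(len(numbers)):
--         current = numbers[i]
--         greater_elements = [num for num in numbers if num > current]
--
--         if greater_elements:
--             product = 1
--             for num in greater_elements:
--                 product *= num
--             result.append(product)
--         else:
--             result.append(0)
--
--     return result
-- ===== SOURCE B (Python) =====
-- def list_comparison_product(numbers: list[int]) -> list[int]:
--     # Sort descending once; a running product of everything consumed so far is,
--     # at the first occurrence of each value v, exactly the product of the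
--     # elements strictly greater than v (0 for the maximum, as in the task).
--     table = {}
--     running = 1
--     for v in sorted(numbers, reverse=True):
--         if v not in table:
--             table[v] = running if table else 0
--         running *= v
--     return [table[v] for v in numbers]
-- ===== Notes on version B (the rewrite author's own statement) =====
-- stated objective: faster
-- what changed: A rescans the whole list for every element (filter the strictly-greater elements, then multiply them); B sorts once in descending order and, in a single pass with a running product, tabulates for each distinct value the product of the strictly greater elements (0 for the maximum), then answers every position by one dictionary lookup.
import Mathlib
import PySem

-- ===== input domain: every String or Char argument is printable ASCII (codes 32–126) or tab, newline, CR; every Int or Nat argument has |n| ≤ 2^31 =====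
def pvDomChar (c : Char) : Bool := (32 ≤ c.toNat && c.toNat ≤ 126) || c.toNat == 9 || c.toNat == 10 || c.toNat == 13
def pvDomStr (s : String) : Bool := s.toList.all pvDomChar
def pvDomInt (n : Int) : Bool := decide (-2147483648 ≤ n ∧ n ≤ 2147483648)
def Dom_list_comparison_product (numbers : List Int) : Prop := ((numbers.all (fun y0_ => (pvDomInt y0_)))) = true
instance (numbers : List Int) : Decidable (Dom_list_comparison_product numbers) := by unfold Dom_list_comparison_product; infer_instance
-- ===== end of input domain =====

-- B replaces A's quadratic per-element rescan by one descending sort with a running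
-- product tabulated per distinct value (objective: faster, O(n log n) vs O(n^2)).

-- ===== PORT A =====
def list_comparison_product (numbers : List Int) : List Int :=
  (PySem.List.pyRange 0 (PySem.List.len numbers) 1).foldl
    (fun result i =>
      let current := PySem.List.pyGetD numbers i 0   -- numbers[i]; i ∈ range(len) is in range
      let greater_elements := numbers.filter (fun num => num > current)
      if greater_elements ≠ [] then
        result ++ [greater_elements.foldl (fun product num => product * num) 1]
      else
        result ++ [0]) []

-- ===== PORT B =====
-- one iteration of B's loop body: state = (table, running)
def lcpStep (st : PySem.Dict Int Int × Int) (v : Int) : PySem.Dict Int Int × Int :=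
  let table := if st.1.contains v = false then
      st.1.insert v (if st.1.size = 0 then 0 else st.2)
    else st.1
  (table, st.2 * v)

def list_comparison_product_alt (numbers : List Int) : List Int :=
  let st := (PySem.List.sorted numbers (fun x => x) true).foldl lcpStep (PySem.Dict.empty, 1)
  -- table[v]: every v ∈ numbers was inserted, so the lookup never misses (getD's 0 is never used)
  numbers.map (fun v => st.1.getD v 0)

-- ===== PRECONDITION & SPEC =====
def Spec_list_comparison_product (numbers : List Int) (out : List Int) : Prop := out = list_comparison_product_alt numbers
instance (numbers : List Int) (out : List Int) : Decidable (Spec_list_comparison_product numbers out) := by unfold Spec_list_comparison_product; infer_instance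

-- ===== CLAIM (what is proved, stated in full; the proofs are below) =====
def Claim_equal_list_comparison_product : Prop := ∀ (numbers : List Int), Dom_list_comparison_product numbers → Spec_list_comparison_product numbers (list_comparison_product numbers)

-- ===== LEMMAS AND PROOFS =====

-- the per-element value both programs compute
def lcpVal (numbers : List Int) (v : Int) : Int :=
  if numbers.filter (fun num => num > v) = [] then 0
  else (numbers.filter (fun num => num > v)).prod

lemma lcp_A_eq_map (numbers : List Int) :
    list_comparison_product numbers = numbers.map (lcpVal numbers) := by
  unfold list_comparison_product
  have hfun : (fun (result : List Int) (i : Int) =>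
      let current := PySem.List.pyGetD numbers i 0
      let greater_elements := numbers.filter (fun num => num > current)
      if greater_elements ≠ [] then
        result ++ [greater_elements.foldl (fun product num => product * num) 1]
      else
        result ++ [0]) =
      (fun result i => result ++ [lcpVal numbers (PySem.List.pyGetD numbers i 0)]) := by
    funext result i
    simp only [lcpVal, ← List.prod_eq_foldl]
    split_ifs with h1 h2 <;> simp_all
  rw [hfun, PySem.List.foldl_append_singleton_eq_map, List.nil_append]
  set F := lcpVal numbers with hF
  conv_rhs => rw [← PySem.List.map_pyGetD_pyRange_zero numbers 0]
  rw [List.map_map]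
  rfl

lemma lcp_size_ne_zero_of_get? (d : PySem.Dict Int Int) (v w : Int)
    (h : d.get? v = some w) : d.size ≠ 0 := by
  rcases d with ⟨items⟩; cases items <;> simp_all [PySem.Dict.get?, PySem.Dict.size]

lemma lcp_size_insert_ne_zero (d : PySem.Dict Int Int) (k x : Int) :
    (d.insert k x).size ≠ 0 := by
  rcases d with ⟨items⟩
  cases items <;> simp [PySem.Dict.insert, PySem.Dict.size] <;> split <;> simp

-- keys already in the table are never overwritten by the loop
lemma lcp_persist (rest : List Int) (d : PySem.Dict Int Int) (r v w : Int)
    (h : d.get? v = some w) :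
    ((rest.foldl lcpStep (d, r)).1).get? v = some w := by
  induction rest generalizing d r with
  | nil => simpa using h
  | cons a t ih =>
    simp only [List.foldl_cons]
    apply ih
    split
    · rename_i hc
      have hva : v ≠ a := by
        intro he; subst he
        rw [PySem.Dict.contains_eq_isSome_get?, h] at hc; simp at hc
      rw [PySem.Dict.get?_insert_of_ne _ _ hva]; exact h
    · exact h

-- loop invariant: after folding a descending `rest`, the table entry of any v ∈ rest
lemma lcp_inv (rest : List Int) (d : PySem.Dict Int Int) (r : Int)
    (hs : rest.Pairwise (fun a b => b ≤ a)) (v : Int) (hv : v ∈ rest) :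
    ((rest.foldl lcpStep (d, r)).1).get? v =
      some (match d.get? v with
        | some w => w
        | none =>
          if d.size = 0 ∧ rest.filter (fun u => u > v) = [] then 0
          else r * (rest.filter (fun u => u > v)).prod) := by
  induction rest generalizing d r with
  | nil => cases hv
  | cons a t ih =>
    have hle : ∀ b ∈ t, b ≤ a := fun b hb => (List.pairwise_cons.mp hs).1 b hb
    have hst : t.Pairwise (fun a b => b ≤ a) := (List.pairwise_cons.mp hs).2
    simp only [List.foldl_cons]
    by_cases hva : v = a
    · subst hva
      -- head element: no strictly greater element remains in v :: t
      have hfil : (v :: t).filter (fun u => u > v) = [] := by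
        rw [List.filter_eq_nil_iff]
        intro b hb
        rcases hb with _ | hb
        · simp
        · have := hle b (by assumption); simp; omega
      cases hga : d.get? v with
      | some w =>
        have : lcpStep (d, r) v = (d, r * v) := by
          simp [lcpStep, PySem.Dict.contains_eq_isSome_get?, hga]
        rw [this, lcp_persist t d (r * v) v w hga]
      | none =>
        have hnc : d.contains v = false := by
          rw [PySem.Dict.contains_eq_isSome_get?, hga]; rfl
        have hstep : lcpStep (d, r) v =
            (d.insert v (if d.size = 0 then 0 else r), r * v) := by
          simp [lcpStep, hnc]
        rw [hstep,
          lcp_persist t _ (r * v) v _ (PySem.Dict.get?_insert_self _ _ _), hfil]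
        by_cases hd0 : d.size = 0 <;> simp [hd0]
    · have hvt : v ∈ t := by
        cases hv with
        | head => exact absurd rfl hva
        | tail _ h => exact h
      have hav : v < a := lt_of_le_of_ne (hle v hvt) hva
      have hfil : (a :: t).filter (fun u => u > v) = a :: t.filter (fun u => u > v) := by
        simp [hav]
      by_cases hc : d.contains v = true
      · -- v already tabulated: untouched forever
        rcases (PySem.Dict.contains_eq_isSome_get? d v ▸ hc : (d.get? v).isSome = true)
          |> Option.isSome_iff_exists.mp with ⟨w, hw⟩
        rw [hw]
        have : (lcpStep (d, r) a).1.get? v = some w := by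
          simp only [lcpStep]
          split
          · rw [PySem.Dict.get?_insert_of_ne _ _ hva]; exact hw
          · exact hw
        exact lcp_persist t _ _ v w this
      · have hgv : d.get? v = none := by
          rw [PySem.Dict.contains_eq_isSome_get?] at hc
          exact Option.not_isSome_iff_eq_none.mp (by simpa using hc)
        rw [hgv]
        -- after the step the table is nonempty and v is still absent
        simp only [lcpStep]
        split
        · rw [ih _ _ hst hvt, PySem.Dict.get?_insert_of_ne _ _ hva, hgv]
          have hne := lcp_size_insert_ne_zero d a (if d.size = 0 then 0 else r)
          rw [hfil]
          simp [hne, List.prod_cons]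
          ring
        · rename_i hca
          simp only [Bool.not_eq_false] at hca
          rcases (PySem.Dict.contains_eq_isSome_get? d a ▸ hca : (d.get? a).isSome = true)
            |> Option.isSome_iff_exists.mp with ⟨w, hw⟩
          have hne := lcp_size_ne_zero_of_get? d a w hw
          rw [ih _ _ hst hvt, hgv, hfil]
          simp [hne, List.prod_cons]
          ring

lemma lcp_B_eq_map (numbers : List Int) :
    list_comparison_product_alt numbers = numbers.map (lcpVal numbers) := by
  unfold list_comparison_product_alt
  apply List.map_congr_left
  intro v hv
  set s := PySem.List.sorted numbers (fun x => x) true with hsdef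
  have hperm : s.Perm numbers := PySem.List.sorted_perm numbers (fun x => x) true
  have hpair : s.Pairwise (fun a b => b ≤ a) :=
    PySem.List.sorted_pairwise_rev numbers (fun x => x)
  have hvs : v ∈ s := hperm.mem_iff.mpr hv
  have hfp : (s.filter (fun u => u > v)).Perm (numbers.filter (fun u => u > v)) :=
    hperm.filter _
  have h := lcp_inv s PySem.Dict.empty 1 hpair v hvs
  rw [PySem.Dict.get?_empty] at h
  rw [PySem.Dict.getD_eq_get?_getD, h]
  simp only [PySem.Dict.size_empty, true_and, Option.getD_some, lcpVal]
  have hnil : (s.filter (fun u => u > v)) = [] ↔ (numbers.filter (fun u => u > v)) = [] :=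
    ⟨fun h' => (h' ▸ hfp).symm.eq_nil, fun h' => (h' ▸ hfp.symm).symm.eq_nil⟩
  by_cases hf : (numbers.filter (fun u => u > v)) = []
  · simp [hf, hnil.mpr hf]
  · rw [if_neg (fun h' => hf (hnil.mp h')), if_neg hf, hfp.prod_eq, one_mul]

-- ===== VERDICT (by name: the statement is the Claim_ definition above) =====
theorem list_comparison_product_spec : Claim_equal_list_comparison_product := by
  intro numbers _
  show _ = _
  rw [lcp_A_eq_map, lcp_B_eq_map]
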